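-- pv_equiv track=rewrite | github.com/kunamax/Static-Cod-Analyzer | code_analyzer.py | S005
-- ===== SOURCE A (Python) =====
-- def S005(line):
--     in_comment = False
--     for index, char in enumerate(line):
--         if char == '#':
--             in_comment = True
--         if char.lower() == 't' and len(line) > index + 3:
--             char = char + line[index + 1] + line[index + 2] + line[index + 3]
--             char = char.lower()
--             if char == 'todo' and in_comment:
--                 return True
--     return False
-- ===== SOURCE B (Python) =====
-- def S005(line):
--     i = line.find('#')
--     if i == -1:
--         return False
--     return 'todo' in line[i + 1:].lower()
-- ===== Notes on version B (the rewrite author's own statement) =====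
-- stated objective: simpler
-- what changed: Replaces the indexed character loop with its in_comment flag and 4-char window assembly by one locate step for the first comment marker plus a single substring search over the lowercased tail.
import Mathlib
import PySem

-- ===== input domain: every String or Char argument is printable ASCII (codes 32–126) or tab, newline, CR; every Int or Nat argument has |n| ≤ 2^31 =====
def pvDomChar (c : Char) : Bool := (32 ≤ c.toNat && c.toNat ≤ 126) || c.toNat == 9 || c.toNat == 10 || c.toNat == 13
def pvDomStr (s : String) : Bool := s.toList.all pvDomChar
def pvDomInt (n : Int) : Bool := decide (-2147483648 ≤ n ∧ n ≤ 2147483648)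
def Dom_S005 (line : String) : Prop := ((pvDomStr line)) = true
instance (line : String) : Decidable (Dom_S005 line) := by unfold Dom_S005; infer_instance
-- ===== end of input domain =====

-- B replaces A's indexed character loop with in_comment flag by find('#') plus one
-- substring search in the lowercased tail (objective: simpler).

-- ===== PORT A =====
-- literal port of A: indexed loop over the characters with an in_comment flag,
-- reading line[index+1..index+3] from the whole string when a 't' is seen
-- (the reads are always in range because of the length guard, so .getD ' ' is exact)
def S005go (full : List Char) : List Char → Nat → Bool → Bool
  | [], _, _ => false
  | c :: rest, i, inC =>
    let inC' := if c == '#' then true else inC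
    if PySem.Chars.lowerChar c == 't' && decide (full.length > i + 3) then
      let w := [c, (PySem.List.pyGet? full ((i : Int) + 1)).getD ' ',
                   (PySem.List.pyGet? full ((i : Int) + 2)).getD ' ',
                   (PySem.List.pyGet? full ((i : Int) + 3)).getD ' ']
      let w := w.map PySem.Chars.lowerChar
      if w == ['t', 'o', 'd', 'o'] && inC' then true
      else S005go full rest (i + 1) inC'
    else S005go full rest (i + 1) inC'

def S005 (line : String) : Bool := S005go line.toList line.toList 0 false

-- ===== PORT B =====
def S005_alt (line : String) : Bool :=
  let i := PySem.Str.find line "#"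
  if i == -1 then false
  else PySem.Str.isIn "todo" (PySem.Str.lower (PySem.Str.slice line (some (i + 1)) none))

-- ===== PRECONDITION & SPEC =====
def Spec_S005 (line : String) (out : Bool) : Prop := out = S005_alt line
instance (line : String) (out : Bool) : Decidable (Spec_S005 line out) := by unfold Spec_S005; infer_instance

-- ===== CLAIM (what is proved, stated in full; the proofs are below) =====
def Claim_equal_S005 : Prop := ∀ (line : String), Dom_S005 line → Spec_S005 line (S005 line)

-- ===== LEMMAS AND PROOFS =====

-- A's loop with the full-list reads localised to the remaining suffix
def S005go' : List Char → Bool → Bool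
  | [], _ => false
  | c :: rest, inC =>
    let inC' := if c == '#' then true else inC
    if decide (['t', 'o', 'd', 'o'] <+: (c :: rest).map PySem.Chars.lowerChar) && inC' then true
    else S005go' rest inC'

theorem S005go_eq_go' (rest : List Char) : ∀ (pre : List Char) (inC : Bool),
    S005go (pre ++ rest) rest pre.length inC = S005go' rest inC := by
  induction rest with
  | nil => intro pre inC; simp [S005go, S005go']
  | cons c t ih =>
    intro pre inC
    have hrec : ∀ b, S005go (pre ++ c :: t) t (pre.length + 1) b = S005go' t b := by
      intro b
      have h := ih (pre ++ [c]) b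
      simpa using h
    have hcast : ∀ k : Nat, ((pre.length : Int) + (k : Int)) = ((pre.length + k : Nat) : Int) := by
      intro k; push_cast; ring
    have hget : ∀ k : Nat, (PySem.List.pyGet? (pre ++ c :: t) ((pre.length : Int) + (k : Int))).getD ' '
        = ((c :: t)[k]?).getD ' ' := by
      intro k
      rw [hcast k, PySem.List.pyGet?_natCast]
      rw [List.getElem?_append_right (by omega)]
      simp
    rw [S005go, S005go']
    have h1 := hget 1
    have h2 := hget 2
    have h3 := hget 3
    norm_num at h1 h2 h3
    simp only [h1, h2, h3, List.length_append, List.length_cons]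
    rcases t with _ | ⟨a, t⟩
    · simp [hrec, List.cons_prefix_cons]
    rcases t with _ | ⟨b, t⟩
    · simp [hrec, List.cons_prefix_cons]
    rcases t with _ | ⟨d, t⟩
    · simp [hrec, List.cons_prefix_cons]
    · -- length ≥ 3: the guarded window equals the prefix condition
      have hlen : decide (pre.length + ((a :: b :: d :: t).length + 1) > pre.length + 3) = true := by
        simp only [decide_eq_true_eq, List.length_cons]; omega
      simp only [hlen, Bool.and_true]
      by_cases hp : ['t', 'o', 'd', 'o'] <+: (c :: a :: b :: d :: t).map PySem.Chars.lowerChar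
      · have hp' := hp
        simp only [List.map_cons, List.cons_prefix_cons] at hp'
        obtain ⟨e1, e2, e3, e4, -⟩ := hp'
        simp [← e1, ← e2, ← e3, ← e4, hrec]
      · have hpd : decide (['t', 'o', 'd', 'o'] <+: (c :: a :: b :: d :: t).map PySem.Chars.lowerChar) = false := by
          simpa using hp
        simp only [hpd, Bool.false_and, Bool.false_eq_true, if_false, hrec]
        simp only [List.map_cons, List.cons_prefix_cons] at hp
        by_cases ht : PySem.Chars.lowerChar c = 't'
        · have hw : ([PySem.Chars.lowerChar c, PySem.Chars.lowerChar a, PySem.Chars.lowerChar b,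
              PySem.Chars.lowerChar d] == ['t', 'o', 'd', 'o']) = false := by
            simp only [beq_eq_false_iff_ne, ne_eq]
            intro h
            simp only [List.cons.injEq, and_true] at h
            exact hp ⟨h.1.symm, h.2.1.symm, h.2.2.1.symm, h.2.2.2.symm, List.nil_prefix⟩
          simp [ht]
          intro ea eb ed _
          exact absurd ⟨ht.symm, ea.symm, eb.symm, ed.symm, List.nil_prefix⟩ hp
        · have ht' : (PySem.Chars.lowerChar c == 't') = false := by simpa using ht
          simp [ht']

theorem S005lower_cons (c : Char) (t : List Char) :
    PySem.Chars.lower (c :: t) = PySem.Chars.lowerChar c :: PySem.Chars.lower t := by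
  simp [PySem.Chars.lower]

theorem S005lower_map (t : List Char) : PySem.Chars.lower t = t.map PySem.Chars.lowerChar := by
  simp [PySem.Chars.lower]

theorem S005go'_true (rest : List Char) :
    S005go' rest true = PySem.Chars.isIn ['t', 'o', 'd', 'o'] (PySem.Chars.lower rest) := by
  induction rest with
  | nil =>
    have h : PySem.Chars.isIn ['t', 'o', 'd', 'o'] (PySem.Chars.lower []) = false := by
      rw [PySem.Chars.isIn_eq_false_iff]
      simp [PySem.Chars.lower]
    rw [h]; rfl
  | cons c t ih =>
    have hstep : S005go' (c :: t) true =
        (decide (['t', 'o', 'd', 'o'] <+: (c :: t).map PySem.Chars.lowerChar) || S005go' t true) := by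
      rw [S005go']
      by_cases hp : ['t', 'o', 'd', 'o'] <+: (c :: t).map PySem.Chars.lowerChar <;> simp [*]
    have hiff : PySem.Chars.isIn ['t', 'o', 'd', 'o'] (PySem.Chars.lower (c :: t)) = true ↔
        (['t', 'o', 'd', 'o'] <+: (c :: t).map PySem.Chars.lowerChar ∨
          PySem.Chars.isIn ['t', 'o', 'd', 'o'] (PySem.Chars.lower t) = true) := by
      rw [PySem.Chars.isIn_iff_infix, PySem.Chars.isIn_iff_infix, S005lower_cons, S005lower_map,
        List.infix_cons_iff, List.map_cons]
    rw [hstep, ih, Bool.eq_iff_iff]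
    simp only [Bool.or_eq_true, decide_eq_true_eq]
    exact hiff.symm

theorem S005go'_false_no_hash (rest : List Char) (h : '#' ∉ rest) :
    S005go' rest false = false := by
  induction rest with
  | nil => rfl
  | cons c t ih =>
    rw [S005go']
    have hc : (c == '#') = false := by
      simp only [beq_eq_false_iff_ne, ne_eq]
      intro he; exact h (he ▸ List.mem_cons_self)
    simp only [hc, Bool.false_eq_true, if_false, Bool.and_false, Bool.false_eq_true, if_false]
    exact ih (fun hm => h (List.mem_cons_of_mem _ hm))

theorem S005go'_false_split (u v : List Char) (h : '#' ∉ u) :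
    S005go' (u ++ '#' :: v) false = S005go' v true := by
  induction u with
  | nil =>
    rw [List.nil_append, S005go']
    have hp : ¬ (['t', 'o', 'd', 'o'] <+: ('#' :: v).map PySem.Chars.lowerChar) := by
      intro hp
      simp only [List.map_cons, List.cons_prefix_cons] at hp
      exact absurd hp.1 (by decide)
    have hpd : decide (['t', 'o', 'd', 'o'] <+: ('#' :: v).map PySem.Chars.lowerChar) = false := by
      simpa using hp
    simp only [hpd, Bool.false_and, Bool.false_eq_true, if_false]
    simp
  | cons c t ih =>
    rw [List.cons_append, S005go']
    have hc : (c == '#') = false := by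
      simp only [beq_eq_false_iff_ne, ne_eq]
      intro he; exact h (he ▸ List.mem_cons_self)
    simp only [hc, Bool.false_eq_true, if_false, Bool.and_false, Bool.false_eq_true, if_false]
    exact ih (fun hm => h (List.mem_cons_of_mem _ hm))

theorem S005mem_infix (cs : List Char) (h : '#' ∈ cs) : ['#'] <:+: cs := by
  obtain ⟨s, t, rfl⟩ := List.append_of_mem h
  exact ⟨s, t, by simp⟩

theorem S005main (line : String) : S005 line = S005_alt line := by
  unfold S005 S005_alt
  have hA : S005go line.toList line.toList 0 false = S005go' line.toList false := by
    simpa using S005go_eq_go' line.toList [] false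
  have hfind : PySem.Str.find line "#" = PySem.Chars.find line.toList ['#'] := by
    simp
  by_cases h : PySem.Chars.find line.toList ['#'] = -1
  · -- no '#': both sides are false
    have hmem : '#' ∉ line.toList := by
      intro hm
      exact absurd h ((PySem.Chars.find_ne_neg_one_iff _ _).mpr (S005mem_infix _ hm))
    simp only [hfind, h, BEq.rfl]
    rw [hA, S005go'_false_no_hash _ hmem]
    simp
  · -- '#' found at index n
    have h0 : (0 : Int) ≤ PySem.Chars.find line.toList ['#'] := by
      have h1 := PySem.Chars.neg_one_le_find (s := line.toList) (sub := ['#'])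
      omega
    obtain ⟨hpre, hmin⟩ := PySem.Chars.find_spec (s := line.toList) (sub := ['#']) h0
    set n := (PySem.Chars.find line.toList ['#']).toNat with hn
    obtain ⟨r, hr⟩ := hpre
    have hdropn : line.toList.drop n = '#' :: r := by simpa using hr.symm
    have hr' : r = line.toList.drop (n + 1) := by
      have : line.toList.drop (n + 1) = (line.toList.drop n).drop 1 := by
        rw [List.drop_drop]
      rw [this, hdropn]
      rfl
    have hsplit : line.toList = line.toList.take n ++ '#' :: line.toList.drop (n + 1) := by
      conv_lhs => rw [← List.take_append_drop n line.toList]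
      rw [hdropn, hr']
    have hnotin : '#' ∉ line.toList.take n := by
      intro hm
      obtain ⟨i, hi, hgi⟩ := List.mem_iff_getElem.mp hm
      have hilen : i < n := by
        have := hi
        simp only [List.length_take] at this
        omega
      have hics : i < line.toList.length := by
        have := hi
        simp only [List.length_take] at this
        omega
      apply hmin i hilen
      have hgi' : line.toList[i] = '#' := by
        rw [← hgi]
        exact (List.getElem_take).symm
      refine ⟨line.toList.drop (i + 1), ?_⟩
      rw [← hgi']
      exact List.getElem_cons_drop hics
    have hBcond : (PySem.Chars.find line.toList ['#'] == -1) = false := by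
      simpa using h
    simp only [hfind, hBcond, Bool.false_eq_true, if_false]
    have hAval : S005go' line.toList false =
        PySem.Chars.isIn ['t', 'o', 'd', 'o'] (PySem.Chars.lower (line.toList.drop (n + 1))) := by
      conv_lhs => rw [hsplit]
      rw [S005go'_false_split _ _ hnotin, S005go'_true]
    have hslice : PySem.List.slice line.toList (some (PySem.Chars.find line.toList ['#'] + 1)) none =
        line.toList.drop (n + 1) := by
      rw [PySem.List.slice_from _ (by omega)]
      congr 1
      omega
    rw [hA, hAval]
    simp [PySem.Str.isIn, PySem.Str.lower, PySem.Str.slice, hslice]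

-- ===== VERDICT (by name: the statement is the Claim_ definition above) =====
theorem S005_spec : Claim_equal_S005 := by
  intro line _
  unfold Spec_S005
  exact S005main line
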